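-- pv_equiv track=rewrite | github.com/Rahab666/python-project-lvl2 | gendiff/methods_of_comparison/gendiff_json.py | key_sorting
-- ===== SOURCE A (Python) =====
-- import copy
--
-- def key_sorting(first_dict, second_dict):
--
--     first_keys = list(first_dict.keys())
--     second_keys = list(second_dict.keys())
--     all_keys = copy.deepcopy(first_keys)
--     first_keys_copy = copy.deepcopy(first_keys)
--     second_keys_copy = copy.deepcopy(second_keys)
--     all_keys.extend(second_keys_copy)
--     all_keys.sort()
--     equal_keys = []
--
--     for key in first_keys_copy:
--         if key in second_keys:
--             if first_dict[key] == second_dict[key]: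
--                 equal_keys.append(key)
--                 first_keys.remove(key)
--                 second_keys.remove(key)
--                 all_keys.remove(key)
--             else:
--                 all_keys.remove(key)
--     return all_keys, first_keys, second_keys, equal_keys
-- ===== SOURCE B (Python) =====
-- def key_sorting(first_dict, second_dict):
--     equal_keys = [k for k in first_dict
--                   if k in second_dict and first_dict[k] == second_dict[k]]
--     equal_set = set(equal_keys)
--     first_keys = [k for k in first_dict if k not in equal_set]
--     second_keys = [k for k in second_dict if k not in equal_set]
--     all_keys = sorted(set(first_dict) | set(second_dict))
--     return all_keys, first_keys, second_keys, equal_keys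
-- ===== Notes on version B (the rewrite author's own statement) =====
-- stated objective: simpler
-- what changed: A sorts the concatenated key multiset and then mutates four lists in lockstep with list.remove inside the loop; B builds equal_keys once, filters each dict's keys against an equal_keys set, and gets all_keys as sorted(set|set), with no mutation bookkeeping.
import Mathlib
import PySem

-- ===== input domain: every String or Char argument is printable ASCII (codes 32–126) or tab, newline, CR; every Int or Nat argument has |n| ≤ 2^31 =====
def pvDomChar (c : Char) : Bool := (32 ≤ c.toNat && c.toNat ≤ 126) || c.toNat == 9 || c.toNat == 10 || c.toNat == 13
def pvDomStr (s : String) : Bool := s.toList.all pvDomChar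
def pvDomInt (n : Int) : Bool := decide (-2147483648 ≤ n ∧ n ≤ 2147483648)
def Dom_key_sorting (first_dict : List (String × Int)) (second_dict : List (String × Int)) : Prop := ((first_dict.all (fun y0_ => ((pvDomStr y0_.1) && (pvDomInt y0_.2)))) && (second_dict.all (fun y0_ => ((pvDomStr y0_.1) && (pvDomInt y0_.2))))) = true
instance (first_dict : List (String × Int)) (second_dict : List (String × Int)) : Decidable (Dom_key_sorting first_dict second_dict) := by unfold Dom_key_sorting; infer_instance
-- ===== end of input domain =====

-- B replaces A's sort-a-multiset-then-.remove mutation bookkeeping by three order-preserving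
-- filters plus one sorted set union (objective: simpler; return-value equivalence only).

-- ===== PORT A =====
-- list.remove(key); at every call site of A the key is present, so remove? never returns none there
def pyRemoveA (l : List String) (k : String) : List String :=
  (PySem.List.remove? l k).getD l

-- one iteration of A's for-loop over (all_keys, first_keys, second_keys, equal_keys)
def stepA (first_dict second_dict : List (String × Int))
    (st : List String × List String × List String × List String) (key : String) :
    List String × List String × List String × List String :=
  match st with
  | (all, fk, sk, ek) =>
    if key ∈ sk then
      if PySem.Dict.get? (PySem.Dict.mk first_dict) key
           == PySem.Dict.get? (PySem.Dict.mk second_dict) key then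
        (pyRemoveA all key, pyRemoveA fk key, pyRemoveA sk key, ek ++ [key])
      else
        (pyRemoveA all key, fk, sk, ek)
    else st

def key_sorting (first_dict : List (String × Int)) (second_dict : List (String × Int)) : List String × List String × List String × List String :=
  let first_keys := first_dict.map Prod.fst
  let second_keys := second_dict.map Prod.fst
  let all_keys := PySem.List.sorted (first_keys ++ second_keys) (fun k => k) false
  first_keys.foldl (stepA first_dict second_dict) (all_keys, first_keys, second_keys, [])

-- ===== PORT B =====
def key_sorting_alt (first_dict : List (String × Int)) (second_dict : List (String × Int)) : List String × List String × List String × List String :=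
  let fkeys := first_dict.map Prod.fst
  let skeys := second_dict.map Prod.fst
  let equal_keys := fkeys.filter (fun k =>
    decide (k ∈ skeys) && (PySem.Dict.get? (PySem.Dict.mk first_dict) k
                             == PySem.Dict.get? (PySem.Dict.mk second_dict) k))
  let equal_set := PySem.Set.ofList equal_keys
  let first_keys := fkeys.filter (fun k => !(PySem.Set.contains equal_set k))
  let second_keys := skeys.filter (fun k => !(PySem.Set.contains equal_set k))
  let all_keys := PySem.List.sorted
      (PySem.Set.union (PySem.Set.ofList fkeys) skeys) (fun k => k) false
  (all_keys, first_keys, second_keys, equal_keys)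

-- ===== PRECONDITION & SPEC =====
-- Pre_ excludes association lists with duplicate keys: a Python dict always has distinct keys,
-- so such lists encode no dict input A could ever receive (the list-level ports are unconstrained there).
def Pre_key_sorting (first_dict : List (String × Int)) (second_dict : List (String × Int)) : Prop :=
  (first_dict.map Prod.fst).Nodup ∧ (second_dict.map Prod.fst).Nodup
instance (first_dict : List (String × Int)) (second_dict : List (String × Int)) : Decidable (Pre_key_sorting first_dict second_dict) := by unfold Pre_key_sorting; infer_instance
def pvWitness_key_sorting : (List (String × Int)) × (List (String × Int)) :=
  ([("a", 1), ("b", 2), ("c", 3)], [("b", 2), ("c", 9), ("d", 4)])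

def Spec_key_sorting (first_dict : List (String × Int)) (second_dict : List (String × Int)) (out : List String × List String × List String × List String) : Prop := out = key_sorting_alt first_dict second_dict
instance (first_dict : List (String × Int)) (second_dict : List (String × Int)) (out : List String × List String × List String × List String) : Decidable (Spec_key_sorting first_dict second_dict out) := by unfold Spec_key_sorting; infer_instance

-- ===== CLAIM (what is proved, stated in full; the proofs are below) =====
def Claim_equal_key_sorting : Prop := ∀ (first_dict : List (String × Int)) (second_dict : List (String × Int)), Dom_key_sorting first_dict second_dict → Pre_key_sorting first_dict second_dict → Spec_key_sorting first_dict second_dict (key_sorting first_dict second_dict)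

-- ===== LEMMAS AND PROOFS =====

-- list.remove of a key is List.erase (present or not)
theorem pyRemoveA_eq_erase (l : List String) (k : String) : pyRemoveA l k = l.erase k := by
  unfold pyRemoveA
  by_cases h : k ∈ l
  · rw [PySem.List.remove?_eq_some_erase l k h]; rfl
  · rw [(PySem.List.remove?_eq_none_iff l k).mpr h, List.erase_of_not_mem h]; rfl

-- the loop, with the mutated-state membership test rewritten to fixed predicates:
-- S k = "k is a key of second_dict", P k = "k is an equal key"
theorem foldA_spec (first_dict second_dict : List (String × Int)) (skeys : List String)
    (rest all fk sk ek : List String)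
    (hrest : rest.Nodup)
    (hsk : ∀ k ∈ rest, (k ∈ sk ↔ k ∈ skeys)) :
    rest.foldl (stepA first_dict second_dict) (all, fk, sk, ek) =
      ( rest.foldl (fun a k => if decide (k ∈ skeys) then a.erase k else a) all,
        rest.foldl (fun a k => if (decide (k ∈ skeys) && (PySem.Dict.get? (PySem.Dict.mk first_dict) k == PySem.Dict.get? (PySem.Dict.mk second_dict) k)) then a.erase k else a) fk,
        rest.foldl (fun a k => if (decide (k ∈ skeys) && (PySem.Dict.get? (PySem.Dict.mk first_dict) k == PySem.Dict.get? (PySem.Dict.mk second_dict) k)) then a.erase k else a) sk,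
        ek ++ rest.filter (fun k => decide (k ∈ skeys) && (PySem.Dict.get? (PySem.Dict.mk first_dict) k == PySem.Dict.get? (PySem.Dict.mk second_dict) k)) ) := by
  induction rest generalizing all fk sk ek with
  | nil => simp
  | cons key tail ih =>
    have hkey : key ∈ sk ↔ key ∈ skeys := hsk key (by simp)
    have htail : tail.Nodup := hrest.of_cons
    have hknot : key ∉ tail := (List.nodup_cons.mp hrest).1
    simp only [List.foldl_cons, List.filter_cons, stepA]
    by_cases hmem : key ∈ skeys
    · have hin : key ∈ sk := hkey.mpr hmem
      by_cases heq : PySem.Dict.get? (PySem.Dict.mk first_dict) key = PySem.Dict.get? (PySem.Dict.mk second_dict) key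
      · -- equal key: removed everywhere, appended to equal_keys
        rw [if_pos hin, if_pos (by simp [heq])]
        rw [ih (pyRemoveA all key) (pyRemoveA fk key) (pyRemoveA sk key) (ek ++ [key]) htail
            (by
              intro k hk
              rw [pyRemoveA_eq_erase]
              have hne : k ≠ key := fun h => hknot (h ▸ hk)
              rw [List.mem_erase_of_ne hne]
              exact hsk k (by simp [hk]))]
        simp [pyRemoveA_eq_erase, hmem, heq]
      · -- shared key with different values: removed only from all_keys
        rw [if_pos hin, if_neg (by simp [heq])]
        rw [ih (pyRemoveA all key) fk sk ek htail (fun k hk => hsk k (by simp [hk]))]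
        simp [pyRemoveA_eq_erase, hmem, heq]
    · -- key only in first_dict: untouched
      rw [if_neg (fun h => hmem (hkey.mp h))]
      rw [ih all fk sk ek htail (fun k hk => hsk k (by simp [hk]))]
      simp [hmem]

-- erase-if-p folded over a list, starting from a duplicate-free accumulator, is a filter
theorem foldl_erase_filter (p : String → Bool) (rest : List String) :
    ∀ acc : List String, acc.Nodup →
      rest.foldl (fun a k => if p k then a.erase k else a) acc =
        acc.filter (fun x => !(decide (x ∈ rest) && p x)) := by
  induction rest with
  | nil => intro acc _; simp
  | cons key tail ih =>
    intro acc hacc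
    simp only [List.foldl_cons]
    by_cases hp : p key
    · rw [if_pos hp, ih (acc.erase key) (hacc.erase key),
        hacc.erase_eq_filter key, List.filter_filter]
      apply List.filter_congr
      intro x _
      by_cases hx : x = key
      · subst hx; simp [hp]
      · simp [hx, bne_iff_ne]
    · rw [if_neg hp, ih acc hacc]
      apply List.filter_congr
      intro x _
      by_cases hx : x = key
      · subst hx; simp [hp]
      · simp [hx]

-- count of an element after A's all_keys removal loop
theorem count_foldl_erase (p : String → Bool) (rest : List String) (x : String) :
    ∀ acc : List String, rest.Nodup →
      (rest.foldl (fun a k => if p k then a.erase k else a) acc).count x =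
        acc.count x - (if x ∈ rest ∧ p x then 1 else 0) := by
  induction rest with
  | nil => intro acc _; simp
  | cons key tail ih =>
    intro acc hrest
    have hknot : key ∉ tail := (List.nodup_cons.mp hrest).1
    simp only [List.foldl_cons]
    by_cases hp : p key
    · rw [if_pos hp, ih (acc.erase key) hrest.of_cons, List.count_erase]
      by_cases hx : x = key
      · subst hx; simp [hp, hknot]
      · simp only [beq_iff_eq, Ne.symm hx, if_false]
        by_cases hxt : x ∈ tail <;> simp [hxt, List.mem_cons, hx]
    · rw [if_neg hp, ih acc hrest.of_cons]
      by_cases hx : x = key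
      · subst hx; simp [hp, hknot]
      · simp [List.mem_cons, hx]

theorem count_of_nodup (l : List String) (x : String) (h : l.Nodup) :
    l.count x = if x ∈ l then 1 else 0 := by
  by_cases hx : x ∈ l
  · simp [hx, List.count_eq_one_of_mem h hx]
  · simp [hx, List.count_eq_zero_of_not_mem hx]

-- any sequence of conditional erasures yields a sublist of the accumulator
theorem foldl_erase_sublist (p : String → Bool) (rest : List String) :
    ∀ acc : List String,
      (rest.foldl (fun a k => if p k then a.erase k else a) acc).Sublist acc := by
  induction rest with
  | nil => intro acc; simp
  | cons key tail ih =>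
    intro acc
    simp only [List.foldl_cons]
    refine (ih _).trans ?_
    split
    · exact List.erase_sublist
    · exact List.Sublist.refl acc

-- the Set.union B builds is set(fkeys ++ skeys)
theorem union_ofList_eq (a b : List String) :
    PySem.Set.union (PySem.Set.ofList a) b = PySem.Set.ofList (a ++ b) := by
  show b.foldl PySem.Set.add (PySem.Set.ofList a) = PySem.Set.ofList (a ++ b)
  rw [PySem.Set.ofList_eq_foldl, PySem.Set.ofList_eq_foldl, List.foldl_append]

-- A's final all_keys is a strictly increasing permutation of set(fkeys ++ skeys)
theorem all_keys_eq (first_dict second_dict : List (String × Int))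
    (hf : (first_dict.map Prod.fst).Nodup) (hs : (second_dict.map Prod.fst).Nodup) :
    PySem.List.sorted (PySem.Set.ofList (first_dict.map Prod.fst ++ second_dict.map Prod.fst)) (fun k => k) false =
      (first_dict.map Prod.fst).foldl
        (fun a k => if decide (k ∈ second_dict.map Prod.fst) then a.erase k else a)
        (PySem.List.sorted (first_dict.map Prod.fst ++ second_dict.map Prod.fst) (fun k => k) false) := by
  set f := first_dict.map Prod.fst with hfdef
  set s := second_dict.map Prod.fst with hsdef
  set res := f.foldl (fun a k => if decide (k ∈ s) then a.erase k else a)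
      (PySem.List.sorted (f ++ s) (fun k => k) false) with hres
  -- counts: res has each key of f ++ s exactly once
  have hcount : ∀ x, res.count x = (PySem.Set.ofList (f ++ s)).count x := by
    intro x
    rw [hres, count_foldl_erase (fun k => decide (k ∈ s)) f x _ hf,
        (PySem.List.sorted_perm (f ++ s) (fun k => k) false).count_eq,
        List.count_append, count_of_nodup f x hf, count_of_nodup s x hs,
        count_of_nodup _ x (PySem.Set.nodup_ofList (f ++ s))]
    simp only [PySem.Set.mem_ofList, List.mem_append, decide_eq_true_eq]
    by_cases h1 : x ∈ f <;> by_cases h2 : x ∈ s <;> simp [h1, h2]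
  -- res is a sublist of the sorted multiset, hence Pairwise (≤); nodup gives Pairwise (<)
  have hsub : res.Sublist (PySem.List.sorted (f ++ s) (fun k => k) false) :=
    foldl_erase_sublist (fun k => decide (k ∈ s)) f _
  have hperm : res.Perm (PySem.Set.ofList (f ++ s)) := List.perm_iff_count.mpr hcount
  have hnd : res.Nodup := hperm.nodup_iff.mpr (PySem.Set.nodup_ofList (f ++ s))
  have hle : res.Pairwise (fun a b : String => a ≤ b) :=
    List.Pairwise.sublist hsub (PySem.List.sorted_pairwise (f ++ s) (fun k => k))
  have hlt : res.Pairwise (fun a b : String => a < b) :=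
    (hle.and hnd).imp (fun h => lt_of_le_of_ne h.1 h.2)
  exact PySem.List.sorted_eq_of_perm_of_pairwise_lt _ res (fun k => k) hperm hlt

-- ===== VERDICT (by name: the statement is the Claim_ definition above) =====
theorem key_sorting_spec : Claim_equal_key_sorting := by
  intro fd sd _ hpre
  obtain ⟨hf, hs⟩ := hpre
  unfold Spec_key_sorting key_sorting key_sorting_alt
  dsimp only
  rw [foldA_spec fd sd (sd.map Prod.fst) _ _ _ _ _ hf (fun _ _ => Iff.rfl)]
  refine Prod.ext ?_ (Prod.ext ?_ (Prod.ext ?_ ?_))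
  · -- all_keys
    rw [union_ofList_eq]
    exact (all_keys_eq fd sd hf hs).symm
  · -- first_keys
    rw [foldl_erase_filter _ _ _ hf]
    apply List.filter_congr
    intro x hx
    by_cases h1 : x ∈ List.map Prod.fst sd
    · simp [PySem.Set.mem_ofList, List.mem_filter, hx, h1, Bool.beq_eq_decide_eq]
    · simp [PySem.Set.mem_ofList, List.mem_filter, h1]
  · -- second_keys
    rw [foldl_erase_filter _ _ _ hs]
    apply List.filter_congr
    intro x hx
    by_cases hxf : x ∈ List.map Prod.fst fd
    · simp [PySem.Set.mem_ofList, List.mem_filter, hxf, hx, Bool.beq_eq_decide_eq]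
    · simp [PySem.Set.mem_ofList, List.mem_filter, hxf]
  · -- equal_keys
    exact List.nil_append _
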